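-- pv_equiv track=rewrite | github.com/vinefeeder/VineFeeder | base_loader.py | display_non_contiguous_series
-- ===== SOURCE A (Python) =====
-- def display_non_contiguous_series(episode_series_numbers):
--     """
--     Display the non-contiguous series numbers in a grid format with 7 columns.
--     This is used when the series numbers are not contiguous, so the user can
--     easily see which series numbers are available.
--     """
--     num_columns = 7
--     num_rows = (len(episode_series_numbers) + num_columns - 1) // num_columns
--
--     # Create a grid-like string to display in the panel
--     grid_content = ""
--     for row in range(num_rows):
--         for col in range(num_columns):
--             idx = row * num_columns + col
--             if idx < len(episode_series_numbers):
--                 grid_content += f"{episode_series_numbers[idx]:<3} "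
--             else:
--                 grid_content += "    "  # Add spacing for alignment
--         grid_content += "\n"  # Add a newline after each row
--
--
--     return grid_content.strip()
-- ===== SOURCE B (Python) =====
-- def display_non_contiguous_series(episode_series_numbers):
--     rows = [episode_series_numbers[i:i + 7]
--             for i in range(0, len(episode_series_numbers), 7)]
--     return '\n'.join(''.join(f'{x:<3} ' for x in row) for row in rows).strip()
-- ===== Notes on version B (the rewrite author's own statement) =====
-- stated objective: simpler
-- what changed: B replaces A's index arithmetic over a row*7+col nested loop with slicing the list into 7-element chunks, joining each formatted chunk with newlines, dropping A's else-branch padding entirely (it is trailing whitespace removed by strip).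
import Mathlib
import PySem

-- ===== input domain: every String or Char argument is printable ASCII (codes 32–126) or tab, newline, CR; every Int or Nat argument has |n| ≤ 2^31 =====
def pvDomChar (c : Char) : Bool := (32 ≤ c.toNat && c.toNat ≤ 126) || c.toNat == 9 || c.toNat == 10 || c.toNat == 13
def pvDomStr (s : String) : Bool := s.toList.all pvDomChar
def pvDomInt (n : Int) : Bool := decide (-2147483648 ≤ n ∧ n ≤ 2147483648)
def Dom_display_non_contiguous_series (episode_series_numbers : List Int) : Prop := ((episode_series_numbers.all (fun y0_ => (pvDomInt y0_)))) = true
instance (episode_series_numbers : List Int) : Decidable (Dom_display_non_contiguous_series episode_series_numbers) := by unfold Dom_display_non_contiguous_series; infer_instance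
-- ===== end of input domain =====

-- B formats the list in 7-element slices joined by newlines instead of A's row*7+col nested
-- index loop with explicit padding; equal outputs, objective: simpler.

-- f"{x:<3} ": str(x) left-justified to width 3, then one literal space (exact for ints)
def pvFmtCell (x : Int) : List Char :=
  let s := PySem.Int.toChars x
  s ++ List.replicate (3 - s.length) ' ' ++ [' ']

-- ===== PORT A =====
def display_non_contiguous_series (episode_series_numbers : List Int) : String :=
  let num_columns : Int := 7
  let num_rows : Int :=
    PySem.Int.floordiv ((episode_series_numbers.length : Int) + num_columns - 1) num_columns
  let grid : List Char :=
    (PySem.List.pyRange 0 num_rows 1).foldl (fun acc row =>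
      ((PySem.List.pyRange 0 num_columns 1).foldl (fun acc2 col =>
        if row * num_columns + col < (episode_series_numbers.length : Int) then
          acc2 ++ pvFmtCell (PySem.List.pyGetD episode_series_numbers (row * num_columns + col) 0)
        else
          acc2 ++ "    ".toList) acc) ++ ['\n']) []
  String.mk (PySem.Chars.strip grid)

-- ===== PORT B =====
def display_non_contiguous_series_alt (episode_series_numbers : List Int) : String :=
  let rows := (PySem.List.pyRange 0 (episode_series_numbers.length : Int) 7).map
      (fun i => PySem.List.slice episode_series_numbers (some i) (some (i + 7)))
  String.mk (PySem.Chars.strip (PySem.Chars.join ['\n']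
      (rows.map (fun row => (row.map pvFmtCell).flatten))))

-- ===== PRECONDITION & SPEC =====
def Spec_display_non_contiguous_series (episode_series_numbers : List Int) (out : String) : Prop := out = display_non_contiguous_series_alt episode_series_numbers
instance (episode_series_numbers : List Int) (out : String) : Decidable (Spec_display_non_contiguous_series episode_series_numbers out) := by unfold Spec_display_non_contiguous_series; infer_instance

-- ===== CLAIM (what is proved, stated in full; the proofs are below) =====
def Claim_equal_display_non_contiguous_series : Prop := ∀ (episode_series_numbers : List Int), Dom_display_non_contiguous_series episode_series_numbers → Spec_display_non_contiguous_series episode_series_numbers (display_non_contiguous_series episode_series_numbers)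

-- ===== LEMMAS AND PROOFS =====

-- one formatted row
def pvRow (row : List Int) : List Char := (row.map pvFmtCell).flatten

-- A's grid, recursively by 7-element chunks (padding and newline after every row)
def pvGA : List Int → List Char
  | [] => []
  | x :: t =>
    pvRow ((x :: t).take 7) ++ List.replicate (4 * (7 - (x :: t).length)) ' '
      ++ '\n' :: pvGA (t.drop 6)
termination_by l => l.length
decreasing_by simp

-- B's grid, recursively by chunks (newline only between rows, no padding)
def pvGB : List Int → List Char
  | [] => []
  | x :: t =>
    pvRow ((x :: t).take 7) ++ (if t.drop 6 = [] then [] else '\n' :: pvGB (t.drop 6))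
termination_by l => l.length
decreasing_by simp

lemma pvDropWhile_all {p : Char → Bool} (w x : List Char) (h : ∀ c ∈ w, p c = true) :
    (w ++ x).dropWhile p = x.dropWhile p := by
  induction w with
  | nil => rfl
  | cons a w ih =>
    simp only [List.cons_append, List.dropWhile_cons, h a (by simp)]
    exact ih (fun c hc => h c (by simp [hc]))

lemma pvStrip_append_ws (x w : List Char) (h : ∀ c ∈ w, PySem.Chars.isspace c = true) :
    PySem.Chars.strip (x ++ w) = PySem.Chars.strip x := by
  simp only [PySem.Chars.strip, PySem.Chars.lstrip, PySem.Chars.rstrip]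
  rw [List.dropWhile_append]
  by_cases hx : (x.dropWhile PySem.Chars.isspace).isEmpty
  · simp only [hx, if_pos]
    rw [List.isEmpty_iff] at hx
    rw [hx]
    have hw : w.dropWhile PySem.Chars.isspace = [] :=
      List.dropWhile_eq_nil_iff.mpr (fun c hc => h c hc)
    rw [hw]
  · simp only [hx, if_neg, Bool.false_eq_true, not_false_iff]
    rw [List.reverse_append]
    rw [pvDropWhile_all _ _ (fun c hc => h c (List.mem_reverse.mp hc))]

-- inner column loop of A, generalized over the column count
lemma pvInner (l : List Int) (r : Nat) (c : Nat) (acc : List Char) :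
    (PySem.List.pyRange 0 (c : Int) 1).foldl (fun acc2 col =>
        if (r : Int) * 7 + col < (l.length : Int) then
          acc2 ++ pvFmtCell (PySem.List.pyGetD l ((r : Int) * 7 + col) 0)
        else
          acc2 ++ "    ".toList) acc
      = acc ++ pvRow ((l.drop (7 * r)).take c)
          ++ List.replicate (4 * (c - (l.length - 7 * r))) ' ' := by
  induction c generalizing acc with
  | zero => simp [PySem.List.pyRange_one_eq_nil, pvRow]
  | succ c ih =>
    have hcast : ((c + 1 : Nat) : Int) = (c : Int) + 1 := by push_cast; ring
    rw [hcast, PySem.List.pyRange_one_succ_right (by positivity), List.foldl_append, ih]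
    simp only [List.foldl_cons, List.foldl_nil]
    by_cases h : 7 * r + c < l.length
    · have hlt : ((r : Int) * 7 + (c : Int)) < (l.length : Int) := by push_cast; omega
      rw [if_pos hlt]
      have hidx : ((r : Int) * 7 + (c : Int)) = ((7 * r + c : Nat) : Int) := by push_cast; ring
      rw [hidx, PySem.List.pyGetD_natCast, List.getD_eq_getElem l 0 h]
      have hc' : c < (l.drop (7 * r)).length := by simp; omega
      have htake : (l.drop (7 * r)).take (c + 1)
          = (l.drop (7 * r)).take c ++ [l[7 * r + c]] := by
        rw [List.take_add_one, List.getElem?_eq_getElem hc']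
        simp [List.getElem_drop]
      rw [htake]
      have hp1 : c + 1 - (l.length - 7 * r) = 0 := by omega
      have hp0 : c - (l.length - 7 * r) = 0 := by omega
      simp [hp1, hp0, pvRow]
    · have hge : ¬ ((r : Int) * 7 + (c : Int)) < (l.length : Int) := by push_cast; omega
      rw [if_neg hge]
      have hlen : (l.drop (7 * r)).length ≤ c := by simp; omega
      rw [List.take_of_length_le (by omega : (l.drop (7 * r)).length ≤ c + 1),
          List.take_of_length_le hlen]
      have hp : 4 * (c + 1 - (l.length - 7 * r)) = 4 * (c - (l.length - 7 * r)) + 4 := by omega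
      rw [hp, List.replicate_add]
      have : "    ".toList = List.replicate 4 ' ' := by decide
      simp [this]

-- outer row loop of A
lemma pvOuter (l : List Int) (R : Nat) (acc : List Char) :
    (PySem.List.pyRange 0 (R : Int) 1).foldl (fun acc row =>
      ((PySem.List.pyRange 0 (7 : Int) 1).foldl (fun acc2 col =>
        if row * 7 + col < (l.length : Int) then
          acc2 ++ pvFmtCell (PySem.List.pyGetD l (row * 7 + col) 0)
        else
          acc2 ++ "    ".toList) acc) ++ ['\n']) acc
      = acc ++ (List.range R).flatMap (fun r =>
          pvRow ((l.drop (7 * r)).take 7)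
            ++ List.replicate (4 * (7 - (l.length - 7 * r))) ' ' ++ ['\n']) := by
  induction R generalizing acc with
  | zero => simp [PySem.List.pyRange_one_eq_nil]
  | succ R ih =>
    have hcast : ((R + 1 : Nat) : Int) = (R : Int) + 1 := by push_cast; ring
    rw [hcast, PySem.List.pyRange_one_succ_right (by positivity), List.foldl_append, ih]
    simp only [List.foldl_cons, List.foldl_nil]
    have h := pvInner l R 7 (acc ++ (List.range R).flatMap (fun r =>
          pvRow ((l.drop (7 * r)).take 7)
            ++ List.replicate (4 * (7 - (l.length - 7 * r))) ' ' ++ ['\n']))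
    norm_num at h
    simp only [List.append_assoc] at h ⊢
    rw [h, List.range_succ, List.flatMap_append]
    simp

-- number of rows, and its recursion by chunks
lemma pvK_succ (n : Nat) (hn : 1 ≤ n) : (n + 6) / 7 = ((n - 7) + 6) / 7 + 1 := by
  rcases Nat.lt_or_ge n 7 with h | h
  · have h1 : n + 6 = (n - 1) + 7 := by omega
    have h2 : n - 7 = 0 := by omega
    rw [h1, Nat.add_div_right _ (by norm_num), h2]
    have : (n - 1) / 7 = 0 := Nat.div_eq_of_lt (by omega)
    simp [this]
  · have h1 : n + 6 = ((n - 7) + 6) + 7 := by omega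
    rw [h1, Nat.add_div_right _ (by norm_num)]

lemma pvFlatA (l : List Int) :
    (List.range ((l.length + 6) / 7)).flatMap (fun r =>
        pvRow ((l.drop (7 * r)).take 7)
          ++ List.replicate (4 * (7 - (l.length - 7 * r))) ' ' ++ ['\n'])
      = pvGA l := by
  induction l using pvGA.induct with
  | case1 => simp [pvGA]
  | case2 x t ih =>
    have hK : ((x :: t).length + 6) / 7 = ((t.drop 6).length + 6) / 7 + 1 := by
      have h := pvK_succ (x :: t).length (by simp)
      simp only [List.length_cons, List.length_drop] at h ⊢
      rw [show t.length + 1 - 7 = t.length - 6 by omega] at h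
      exact h
    rw [hK, List.range_succ_eq_map, List.flatMap_cons, List.flatMap_map]
    have hmapeq : (List.range (((t.drop 6).length + 6) / 7)).flatMap
          (fun r => pvRow (((x :: t).drop (7 * r.succ)).take 7)
            ++ List.replicate (4 * (7 - ((x :: t).length - 7 * r.succ))) ' ' ++ ['\n'])
        = (List.range (((t.drop 6).length + 6) / 7)).flatMap
            (fun r => pvRow (((t.drop 6).drop (7 * r)).take 7)
              ++ List.replicate (4 * (7 - ((t.drop 6).length - 7 * r))) ' ' ++ ['\n']) := by
      apply List.flatMap_congr
      intro r _
      simp only [Nat.succ_eq_add_one, List.drop_drop, List.length_drop, List.length_cons]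
      rw [show (7 * (r + 1)) = (7 * r + 6) + 1 by ring, List.drop_succ_cons]
      rw [show (6 + 7 * r) = 7 * r + 6 by ring,
          show 7 - (t.length + 1 - (7 * r + 6 + 1)) = 7 - (t.length - 6 - 7 * r) by omega]
    rw [hmapeq, ih, pvGA]
    simp

lemma pvJoin_cons_cons (a b : List Char) (L : List (List Char)) :
    PySem.Chars.join ['\n'] (a :: b :: L) = a ++ '\n' :: PySem.Chars.join ['\n'] (b :: L) := by
  simp [PySem.Chars.join, List.intercalate, List.intersperse]

lemma pvFlatB (l : List Int) :
    PySem.Chars.join ['\n'] ((List.range ((l.length + 6) / 7)).map (fun r =>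
        pvRow ((l.drop (7 * r)).take 7)))
      = pvGB l := by
  induction l using pvGB.induct with
  | case1 => simp [pvGB, PySem.Chars.join, List.intercalate]
  | case2 x t ih =>
    have hK : ((x :: t).length + 6) / 7 = ((t.drop 6).length + 6) / 7 + 1 := by
      have := pvK_succ (x :: t).length (by simp)
      simpa using this
    rw [hK, List.range_succ_eq_map, List.map_cons, List.map_map]
    have hdrop : ∀ r : Nat, (x :: t).drop (7 * (r + 1)) = (t.drop 6).drop (7 * r) := by
      intro r
      rw [show 7 * (r + 1) = (6 + 7 * r) + 1 by ring, List.drop_succ_cons, List.drop_drop,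
          Nat.add_comm 6 (7 * r)]
    have hmapeq : (List.range (((t.drop 6).length + 6) / 7)).map
          ((fun r => pvRow (((x :: t).drop (7 * r)).take 7)) ∘ Nat.succ)
        = (List.range (((t.drop 6).length + 6) / 7)).map
            (fun r => pvRow (((t.drop 6).drop (7 * r)).take 7)) := by
      apply List.map_congr_left
      intro r _
      simp only [Function.comp]
      rw [show Nat.succ r = r + 1 from rfl, hdrop r]
    rw [hmapeq]
    have h0 : (x :: t).drop (7 * 0) = x :: t := by simp
    by_cases ht : t.drop 6 = []
    · have : ((t.drop 6).length + 6) / 7 = 0 := by simp [ht]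
      rw [this]
      simp [pvGB, ht, PySem.Chars.join, List.intercalate]
    · have hpos : 0 < ((t.drop 6).length + 6) / 7 := by
        have : t.drop 6 ≠ [] := ht
        have hlen : 1 ≤ (t.drop 6).length := List.length_pos_iff.mpr this
        calc 0 < (1 + 6) / 7 := by norm_num
          _ ≤ ((t.drop 6).length + 6) / 7 := Nat.div_le_div_right (by omega)
      obtain ⟨K', hK'⟩ : ∃ K', ((t.drop 6).length + 6) / 7 = K' + 1 :=
        ⟨_ , (Nat.succ_pred_eq_of_pos hpos).symm⟩
      rw [hK'] at ih ⊢
      rw [List.range_succ_eq_map, List.map_cons] at ih ⊢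
      simp only [Nat.mul_zero, List.drop_zero] at ih ⊢
      rw [pvJoin_cons_cons, ih]
      simp [pvGB, ht]

lemma pvRowsB (l : List Int) :
    (PySem.List.pyRange 0 (l.length : Int) 7).map
        (fun i => PySem.List.slice l (some i) (some (i + 7)))
      = (List.range ((l.length + 6) / 7)).map (fun r => (l.drop (7 * r)).take 7) := by
  rw [PySem.List.pyRange_of_pos 0 (l.length : Int) (by norm_num)]
  have hN : (if (0:Int) < (l.length:Int) then (((l.length:Int) - 0 + (7:Int) - 1) / 7).toNat else 0)
      = (l.length + 6) / 7 := by
    by_cases h : 0 < l.length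
    · rw [if_pos (by exact_mod_cast h)]
      rw [show ((l.length:Int) - 0 + (7:Int) - 1) = ((l.length + 6 : Nat) : Int) by push_cast; ring]
      omega
    · rw [if_neg (by exact_mod_cast h)]
      have h0 : l.length = 0 := by omega
      simp [h0]
  rw [hN, List.map_map]
  apply List.map_congr_left
  intro r _
  show PySem.List.slice l (some ((0:Int) + 7 * (r:Int))) (some ((0:Int) + 7 * (r:Int) + 7)) = _
  rw [show (0:Int) + 7 * (r:Int) = ((7 * r : Nat) : Int) by push_cast; ring]
  rw [show ((7 * r : Nat) : Int) + 7 = ((7 * r : Nat) : Int) + ((7:Nat):Int) by norm_num]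
  rw [PySem.List.slice_natCast_add]

lemma pvGA_eq_GB (l : List Int) :
    ∃ w, pvGA l = pvGB l ++ w ∧ ∀ c ∈ w, PySem.Chars.isspace c = true := by
  induction l using pvGA.induct with
  | case1 => exact ⟨[], by simp [pvGA, pvGB]⟩
  | case2 x t ih =>
    by_cases ht : t.drop 6 = []
    · refine ⟨List.replicate (4 * (7 - (x :: t).length)) ' ' ++ ['\n'], ?_, ?_⟩
      · rw [pvGA, pvGB, if_pos ht, ht, pvGA]
        simp
      · intro c hc
        rcases List.mem_append.mp hc with h | h
        · rw [List.eq_of_mem_replicate h]; decide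
        · simp at h; rw [h]; decide
    · obtain ⟨w, hw, hws⟩ := ih
      refine ⟨w, ?_, hws⟩
      have hlen : 7 - (x :: t).length = 0 := by
        have : 7 ≤ t.length := by
          by_contra h
          exact ht (List.drop_eq_nil_of_le (by omega))
        simp; omega
      rw [pvGA, pvGB, if_neg ht, hlen, hw]
      simp

-- ===== VERDICT (by name: the statement is the Claim_ definition above) =====
theorem display_non_contiguous_series_spec : Claim_equal_display_non_contiguous_series := by
  intro l _
  unfold Spec_display_non_contiguous_series
  have hA : display_non_contiguous_series l = String.mk (PySem.Chars.strip (pvGA l)) := by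
    simp only [display_non_contiguous_series]
    have hK : PySem.Int.floordiv ((l.length : Int) + 7 - 1) 7
        = (((l.length + 6) / 7 : Nat) : Int) := by
      rw [show ((l.length : Int) + 7 - 1) = ((l.length + 6 : Nat) : Int) by push_cast; ring]
      simp only [PySem.Int.floordiv]
      rw [Int.fdiv_eq_ediv] <;> omega
    rw [hK, pvOuter l ((l.length + 6) / 7) [], pvFlatA]
    simp
  have hB : display_non_contiguous_series_alt l = String.mk (PySem.Chars.strip (pvGB l)) := by
    simp only [display_non_contiguous_series_alt]
    rw [pvRowsB, List.map_map]
    have : (fun row => (List.map pvFmtCell row).flatten) ∘ (fun r => (l.drop (7 * r)).take 7)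
        = fun r => pvRow ((l.drop (7 * r)).take 7) := by
      funext r; simp [pvRow]
    rw [this, pvFlatB]
  rw [hA, hB]
  obtain ⟨w, hw, hws⟩ := pvGA_eq_GB l
  rw [hw, pvStrip_append_ws _ w hws]
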